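-- pv_equiv track=rewrite | github.com/S3nna13/Aurelius | src/computer_use/screen_analyzer.py | count_color_changes
-- ===== SOURCE A (Python) =====
-- def count_color_changes(row: list[tuple[int, int, int]]) -> int:
--     """Count the number of times the color changes between adjacent pixels."""
--     if len(row) <= 1:
--         return 0
--     count = 0
--     prev = row[0]
--     for color in row[1:]:
--         if color != prev:
--             count += 1
--             prev = color
--     return count
-- ===== SOURCE B (Python) =====
-- def count_color_changes(row: list[tuple[int, int, int]]) -> int:
--     """Divide and conquer: split the row in half, count changes in each half
--     recursively, and add one boundary change if the halves meet with
--     different colors."""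
--     n = len(row)
--     if n <= 1:
--         return 0
--     mid = n // 2
--     left, right = row[:mid], row[mid:]
--     return (count_color_changes(left) + count_color_changes(right)
--             + (1 if left[-1] != right[0] else 0))
-- ===== Notes on version B (the rewrite author's own statement) =====
-- stated objective: alternative
-- what changed: Replaces A's single linear pass with a prev/count accumulator by a divide-and-conquer recursion: split the row in half, recursively count changes in each half, and add one if the colors at the boundary differ.
import Mathlib
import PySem

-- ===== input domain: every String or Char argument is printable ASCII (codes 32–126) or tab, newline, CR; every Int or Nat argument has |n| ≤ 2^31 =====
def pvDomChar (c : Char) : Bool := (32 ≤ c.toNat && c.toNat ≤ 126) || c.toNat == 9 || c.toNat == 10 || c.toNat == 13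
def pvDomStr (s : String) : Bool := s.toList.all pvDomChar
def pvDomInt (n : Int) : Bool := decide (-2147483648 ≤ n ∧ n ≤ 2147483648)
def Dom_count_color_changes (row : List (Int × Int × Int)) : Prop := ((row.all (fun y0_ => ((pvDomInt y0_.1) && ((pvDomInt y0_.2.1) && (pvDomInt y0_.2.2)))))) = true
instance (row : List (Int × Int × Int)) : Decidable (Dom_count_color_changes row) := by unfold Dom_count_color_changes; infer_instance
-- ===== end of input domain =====

-- B replaces A's linear prev/count walk with a divide-and-conquer recursion:
-- split the row in half, recurse on both halves, and add one boundary change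
-- if the halves meet with different colors; objective: alternative.

-- ===== PORT A =====
def count_color_changes (row : List (Int × Int × Int)) : Int :=
  if row.length ≤ 1 then 0
  else
    match row with
    | [] => 0
    | p :: rest =>
      (rest.foldl (fun (s : Int × (Int × Int × Int)) color =>
        if color ≠ s.2 then (s.1 + 1, color) else s) (0, p)).1

-- ===== PORT B =====
-- row[:mid] / row[mid:] with 0 ≤ mid ≤ len are exactly List.take/drop;
-- left[-1] and right[0] are getLast?/head? (both halves are nonempty here).
def count_color_changes_alt (row : List (Int × Int × Int)) : Int :=
  if h : row.length ≤ 1 then 0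
  else
    let mid := row.length / 2
    let left := row.take mid
    let right := row.drop mid
    count_color_changes_alt left + count_color_changes_alt right +
      (if left.getLast? ≠ right.head? then 1 else 0)
termination_by row.length
decreasing_by
  · simp only [List.length_take]; omega
  · simp only [List.length_drop]; omega

-- ===== PRECONDITION & SPEC =====
def Spec_count_color_changes (row : List (Int × Int × Int)) (out : Int) : Prop := out = count_color_changes_alt row
instance (row : List (Int × Int × Int)) (out : Int) : Decidable (Spec_count_color_changes row out) := by unfold Spec_count_color_changes; infer_instance

-- ===== CLAIM (what is proved, stated in full; the proofs are below) =====
def Claim_equal_count_color_changes : Prop := ∀ (row : List (Int × Int × Int)), Dom_count_color_changes row → Spec_count_color_changes row (count_color_changes row)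

-- ===== LEMMAS AND PROOFS =====

-- number of adjacent unequal pairs in a::l
def ccAux (a : Int × Int × Int) : List (Int × Int × Int) → Nat
  | [] => 0
  | x :: xs => (if x = a then 0 else 1) + ccAux x xs

-- number of adjacent unequal pairs in a list
def cc : List (Int × Int × Int) → Nat
  | [] => 0
  | a :: l => ccAux a l

theorem ccAux_append (xs : List (Int × Int × Int)) :
    ∀ (a b : Int × Int × Int) (ys : List (Int × Int × Int)),
      ccAux a (xs ++ b :: ys) =
        ccAux a xs + (if b = xs.getLast?.getD a then 0 else 1) + ccAux b ys := by
  induction xs with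
  | nil => intro a b ys; simp [ccAux]
  | cons x xs ih =>
    intro a b ys
    have hgd : ∀ d : Int × Int × Int, (x :: xs).getLast?.getD d = xs.getLast?.getD x := by
      intro d; cases hx : xs.getLast? <;> cases xs <;> simp_all
    simp only [List.cons_append, ccAux, ih, hgd]
    omega

theorem cc_append (l1 l2 : List (Int × Int × Int)) (h1 : l1 ≠ []) (h2 : l2 ≠ []) :
    (cc (l1 ++ l2) : Int) =
      cc l1 + cc l2 + (if l1.getLast? ≠ l2.head? then 1 else 0) := by
  match l1, l2 with
  | c :: t1, b :: t2 =>
    have hgl : (c :: t1).getLast? = some (t1.getLast?.getD c) := by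
      cases ht : t1.getLast? <;> cases t1 <;> simp_all
    simp only [cc, List.cons_append, ccAux_append, hgl, List.head?_cons, ne_eq,
      Option.some.injEq]
    by_cases h : b = t1.getLast?.getD c
    · simp [h]
    · rw [if_neg h, if_pos (by simpa using fun he => h he.symm)]
      push_cast
      ring

theorem fold_fst (rest : List (Int × Int × Int)) :
    ∀ (c : Int) (p : Int × Int × Int),
      (rest.foldl (fun (s : Int × (Int × Int × Int)) color =>
        if color ≠ s.2 then (s.1 + 1, color) else s) (c, p)).1 = c + ccAux p rest := by
  induction rest with
  | nil => intro c p; simp [ccAux]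
  | cons x xs ih =>
    intro c p
    rw [List.foldl_cons]
    by_cases h : x = p
    · rw [if_neg (by simp [h])]
      rw [ih]
      simp [ccAux, h]
    · rw [if_pos (by simp [h])]
      rw [ih]
      simp [ccAux, h]
      ring

theorem alt_eq_cc : ∀ (n : Nat) (row : List (Int × Int × Int)), row.length ≤ n →
    count_color_changes_alt row = (cc row : Int) := by
  intro n
  induction n with
  | zero =>
    intro row h
    have : row = [] := List.eq_nil_of_length_eq_zero (Nat.le_zero.mp h)
    subst this
    simp [count_color_changes_alt, cc]
  | succ n ih =>
    intro row h
    by_cases h1 : row.length ≤ 1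
    · match row with
      | [] => simp [count_color_changes_alt, cc]
      | [a] => simp [count_color_changes_alt, cc, ccAux]
      | a :: b :: l => simp at h1
    · rw [count_color_changes_alt]
      simp only [h1, dif_neg, not_false_iff]
      have hmid1 : 1 ≤ row.length / 2 := by omega
      have hmid2 : row.length / 2 < row.length := by omega
      have hlt : (row.take (row.length / 2)).length ≤ n := by
        simp only [List.length_take]; omega
      have hrt : (row.drop (row.length / 2)).length ≤ n := by
        simp only [List.length_drop]; omega
      rw [ih _ hlt, ih _ hrt]
      have hl : row.take (row.length / 2) ≠ [] := by
        intro he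
        have := congrArg List.length he
        simp only [List.length_take, List.length_nil] at this
        omega
      have hr : row.drop (row.length / 2) ≠ [] := by
        intro he
        have := congrArg List.length he
        simp only [List.length_drop, List.length_nil] at this
        omega
      rw [← cc_append _ _ hl hr, List.take_append_drop]

-- ===== VERDICT (by name: the statement is the Claim_ definition above) =====
theorem count_color_changes_spec : Claim_equal_count_color_changes := by
  intro row _
  unfold Spec_count_color_changes count_color_changes
  rw [alt_eq_cc row.length row (le_refl _)]
  by_cases hl : row.length ≤ 1
  · match row with
    | [] => simp [cc]
    | [a] => simp [cc, ccAux]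
    | a :: b :: l => simp at hl
  · simp only [hl, if_false]
    match row with
    | [] => simp at hl
    | p :: rest =>
      change (List.foldl (fun (s : Int × (Int × Int × Int)) color =>
        if color ≠ s.2 then (s.1 + 1, color) else s) (0, p) rest).1 = _
      rw [fold_fst]
      simp [cc]
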